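-- pv_equiv track=rewrite | github.com/esplaver/kg_esplaver_2021 | main.py | check_strings_map
-- ===== SOURCE A (Python) =====
-- def check_strings_map(s1,s2):
-- 	char_frequency1 = {}
-- 	char_frequency2 = {}
-- 	char_dict = {}
-- 	if len(s1)!=len(s2):
-- 		return "false"
--
-- 	#create two dictionaries that keep track of the frequencies of each char in the strings
-- 	for i in range(len(s1)):
-- 		c1 = s1[i]
-- 		c2 = s2[i]
-- 		if char_frequency1.get(c1) == None:
-- 			char_frequency1[c1] = 1
-- 		else:
-- 			char_frequency1[c1] += 1
--
-- 		if char_frequency2.get(c2) == None: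
-- 			char_frequency2[c2] = 1
-- 		else:
-- 			char_frequency2[c2] += 1
--
-- 	#sort the frequencies of the first string in descending order
-- 	char_frequency1 = sorted(char_frequency1.items(), key = lambda x: x[1],reverse = True)
-- 	#check if the chars can match 1-1
-- 	for max_freq_tuple_1 in char_frequency1:
-- 		max_freq_c2 = max(char_frequency2, key=char_frequency2.get)
-- 		#we compare the highest frequencies of chars in both strings (and check the nth highest frequencies each nth iteration)
-- 		#this checks to see if a char in s1 maps to two different chars in s2 (making it not 1-1)
-- 		if max_freq_tuple_1[1] > char_frequency2[max_freq_c2]: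
-- 			return "false"
-- 		else:
-- 			char_frequency2[max_freq_c2] -= max_freq_tuple_1[1] #For s2, cross out the chars that max_freq_tuple_1[0] map to
-- 	return "true"
-- ===== SOURCE B (Python) =====
-- def _insert_desc(rem, m):
--     """insert m into a descending-sorted list, keeping it descending"""
--     if not rem or m >= rem[0]:
--         return [m] + rem
--     return [rem[0]] + _insert_desc(rem[1:], m)
--
-- def check_strings_map(s1, s2):
--     if len(s1) != len(s2):
--         return "false"
--     # frequency multisets as descending value lists; chars themselves are irrelevant
--     need = sorted((s1.count(c) for c in set(s1)), reverse=True)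
--     rem = sorted((s2.count(c) for c in set(s2)), reverse=True)
--     for f in need:
--         if not rem or f > rem[0]:
--             return "false"
--         rem = _insert_desc(rem[1:], rem[0] - f)
--     return "true"
-- ===== Notes on version B (the rewrite author's own statement) =====
-- stated objective: alternative
-- what changed: A builds two char->count dicts in an indexed loop and, for each value-sorted entry of the first, rescans the whole second dict for its max key and decrements it in place; B drops the characters entirely, reduces both strings to descending-sorted frequency-value lists and runs the same greedy check as a coordinated head-first pass with an ordered re-insertion, no dicts and no repeated max scan.
import Mathlib
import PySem

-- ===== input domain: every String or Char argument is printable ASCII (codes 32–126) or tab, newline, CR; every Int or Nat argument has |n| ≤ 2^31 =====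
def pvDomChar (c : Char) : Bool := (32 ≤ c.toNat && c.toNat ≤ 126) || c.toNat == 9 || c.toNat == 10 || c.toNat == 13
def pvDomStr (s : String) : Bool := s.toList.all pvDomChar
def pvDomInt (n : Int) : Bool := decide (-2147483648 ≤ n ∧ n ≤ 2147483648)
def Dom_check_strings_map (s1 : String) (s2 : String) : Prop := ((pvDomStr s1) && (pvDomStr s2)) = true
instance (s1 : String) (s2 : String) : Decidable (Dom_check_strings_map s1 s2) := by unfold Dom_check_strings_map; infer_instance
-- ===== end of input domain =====

-- B replaces A's two hand-built dicts and the repeated linear max-scan over the second dict by two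
-- sorted frequency-value lists consumed head-first with an ordered re-insertion (objective: alternative).

-- ===== PORT A =====
def check_strings_map (s1 : String) (s2 : String) : String :=
  if PySem.Str.len s1 ≠ PySem.Str.len s2 then "false" else
  -- for i in range(len(s1)): build both frequency dicts
  let freqs := (PySem.List.pyRange 0 (PySem.Str.len s1)).foldl
    (fun (st : PySem.Dict Char Int × PySem.Dict Char Int) i =>
      -- s1[i] / s2[i]: i ∈ range(len), always in range, so Python never raises here
      (match st.1.get? (PySem.List.pyGetD s1.toList i ' ') with
        | none => st.1.insert (PySem.List.pyGetD s1.toList i ' ') 1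
        | some v => st.1.insert (PySem.List.pyGetD s1.toList i ' ') (v + 1),
       match st.2.get? (PySem.List.pyGetD s2.toList i ' ') with
        | none => st.2.insert (PySem.List.pyGetD s2.toList i ' ') 1
        | some v => st.2.insert (PySem.List.pyGetD s2.toList i ' ') (v + 1)))
    (PySem.Dict.empty, PySem.Dict.empty)
  -- char_frequency1 = sorted(char_frequency1.items(), key=lambda x: x[1], reverse=True)
  let char_frequency1 := PySem.List.sorted freqs.1.items (fun p => p.2) true
  let final := char_frequency1.foldl
    (fun (st : PySem.Dict Char Int × Option String) t =>
      match st.2 with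
      | some _ => st          -- Python already returned
      | none =>
        -- max(char_frequency2, key=char_frequency2.get): first key of maximal value;
        -- every key is present, so .get is its int value (getD 0 is exact here)
        match PySem.List.max? st.1.keys (fun k => st.1.getD k 0) with
        | none => st          -- unreachable: the dict is nonempty whenever this loop runs (Python's max would raise)
        | some m =>
          if t.2 > st.1.getD m 0 then (st.1, some "false")
          else (st.1.insert m (st.1.getD m 0 - t.2), none))
    (freqs.2, none)
  final.2.getD "true"

-- ===== PORT B =====
-- _insert_desc from Source B: insert m into a descending-sorted list, keeping it descending
def insertDesc (rem : List Int) (m : Int) : List Int :=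
  match rem with
  | [] => [m]
  | r :: rest => if m ≥ r then m :: r :: rest else r :: insertDesc rest m

def check_strings_map_alt (s1 : String) (s2 : String) : String :=
  if PySem.Str.len s1 ≠ PySem.Str.len s2 then "false" else
  -- sorted((s.count(c) for c in set(s)), reverse=True); s.count(c) for a single char c is the
  -- character count, and sorting the numbers makes the result independent of set iteration order
  let need := PySem.List.sorted ((PySem.Set.ofList s1.toList).map
      (fun c => (s1.toList.count c : Int))) (fun x => x) true
  let rem0 := PySem.List.sorted ((PySem.Set.ofList s2.toList).map
      (fun c => (s2.toList.count c : Int))) (fun x => x) true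
  let final := need.foldl
    (fun (st : List Int × Option String) f =>
      match st.2 with
      | some _ => st          -- Python already returned
      | none =>
        match st.1 with
        | [] => (st.1, some "false")
        | r :: rest => if f > r then (r :: rest, some "false") else (insertDesc rest (r - f), none))
    (rem0, none)
  final.2.getD "true"

-- ===== PRECONDITION & SPEC =====
def Spec_check_strings_map (s1 : String) (s2 : String) (out : String) : Prop := out = check_strings_map_alt s1 s2
instance (s1 : String) (s2 : String) (out : String) : Decidable (Spec_check_strings_map s1 s2 out) := by unfold Spec_check_strings_map; infer_instance

-- ===== CLAIM (what is proved, stated in full; the proofs are below) =====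
def Claim_equal_check_strings_map : Prop := ∀ (s1 : String) (s2 : String), Dom_check_strings_map s1 s2 → Spec_check_strings_map s1 s2 (check_strings_map s1 s2)

-- ===== LEMMAS AND PROOFS =====

-- abbreviations for the two loop bodies (exactly the lambdas of the ports)
def stepA (st : PySem.Dict Char Int × Option String) (t : Char × Int) :
    PySem.Dict Char Int × Option String :=
  match st.2 with
  | some _ => st
  | none =>
    match PySem.List.max? st.1.keys (fun k => st.1.getD k 0) with
    | none => st
    | some m =>
      if t.2 > st.1.getD m 0 then (st.1, some "false")
      else (st.1.insert m (st.1.getD m 0 - t.2), none)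

def stepB (st : List Int × Option String) (f : Int) : List Int × Option String :=
  match st.2 with
  | some _ => st
  | none =>
    match st.1 with
    | [] => (st.1, some "false")
    | r :: rest => if f > r then (r :: rest, some "false") else (insertDesc rest (r - f), none)

lemma foldA_some (items : List (Char × Int)) (d : PySem.Dict Char Int) (s : String) :
    items.foldl stepA (d, some s) = (d, some s) := by
  induction items with
  | nil => rfl
  | cons t ts ih => simpa [stepA] using ih

lemma foldB_some (fs : List Int) (rem : List Int) (s : String) :
    fs.foldl stepB (rem, some s) = (rem, some s) := by
  induction fs with
  | nil => rfl
  | cons f fs ih => simpa [stepB] using ih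

lemma countfold (l : List Char) :
    l.foldl (fun (d : PySem.Dict Char Int) c =>
      match d.get? c with
      | none => d.insert c 1
      | some v => d.insert c (v + 1)) PySem.Dict.empty = PySem.Dict.counter l := by
  rw [← PySem.Dict.foldl_insert_getD_add_one_eq_counter]
  apply PySem.List.foldl_congr_mem
  intro acc x _
  cases h : acc.get? x with
  | none => simp [PySem.Dict.getD_of_get?_eq_none acc _ h]
  | some v => simp [PySem.Dict.getD_of_get?_eq_some acc _ h]

lemma insertDesc_perm (rem : List Int) (m : Int) : (insertDesc rem m).Perm (m :: rem) := by
  induction rem with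
  | nil => simp [insertDesc]
  | cons r rest ih =>
    by_cases h : m ≥ r
    · simp [insertDesc, h]
    · simpa [insertDesc, h] using ((ih.cons r).trans (List.Perm.swap m r rest))

lemma insertDesc_ne_nil (rem : List Int) (m : Int) : insertDesc rem m ≠ [] := by
  cases rem with
  | nil => simp [insertDesc]
  | cons r rest => by_cases h : m ≥ r <;> simp [insertDesc, h]

lemma insertDesc_pairwise (rem : List Int) (m : Int)
    (h : rem.Pairwise (fun a b => b ≤ a)) :
    (insertDesc rem m).Pairwise (fun a b => b ≤ a) := by
  induction rem with
  | nil => simp [insertDesc]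
  | cons r rest ih =>
    rw [List.pairwise_cons] at h
    by_cases hm : m ≥ r
    · rw [show insertDesc (r :: rest) m = m :: r :: rest from by simp [insertDesc, hm]]
      refine List.pairwise_cons.2 ⟨?_, List.pairwise_cons.2 ⟨h.1, h.2⟩⟩
      intro b hb
      rcases List.mem_cons.1 hb with rfl | hb
      · exact hm
      · exact le_trans (h.1 b hb) hm
    · rw [show insertDesc (r :: rest) m = r :: insertDesc rest m from by simp [insertDesc, hm]]
      refine List.pairwise_cons.2 ⟨?_, ih h.2⟩
      intro b hb
      rcases List.mem_cons.1 ((insertDesc_perm rest m).mem_iff.1 hb) with rfl | hb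
      · omega
      · exact h.1 b hb

lemma erase_cons_perm (v a : Int) (l : List Int) (h : a ∈ l) :
    ((v :: l).erase a).Perm (v :: l.erase a) := by
  by_cases hv : v = a
  · subst hv
    rw [List.erase_cons_head]
    exact (List.perm_cons_erase h)
  · rw [List.erase_cons_tail (by simpa using hv)]

lemma map_repl_id (its : List (Char × Int)) (m : Char) (w : Int)
    (h : m ∉ its.map (fun p => p.1)) :
    its.map (fun p => if p.1 == m then (m, w) else p) = its := by
  induction its with
  | nil => rfl
  | cons p t ih =>
    simp only [List.map_cons, List.mem_cons, not_or] at h ⊢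
    rw [if_neg (by simp; exact fun hh => h.1 hh.symm), ih h.2]

lemma mapsnd_repl_perm (its : List (Char × Int)) (m : Char) (vm w : Int)
    (hm : (m, vm) ∈ its) (hnd : (its.map (fun p => p.1)).Nodup) :
    ((its.map (fun p => if p.1 == m then (m, w) else p)).map (fun p => p.2)).Perm
      (w :: ((its.map (fun p => p.2)).erase vm)) := by
  induction its with
  | nil => simp at hm
  | cons p t ih =>
    simp only [List.map_cons, List.nodup_cons] at hnd
    by_cases hk : p.1 = m
    · have hpm : p = (m, vm) := by
        rcases List.mem_cons.1 hm with h | h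
        · exact h.symm
        · exact absurd (List.mem_map.2 ⟨(m, vm), h, rfl⟩) (by rw [← hk]; exact hnd.1)
      subst hpm
      have hmt : m ∉ t.map (fun p => p.1) := hnd.1
      rw [show (((m, vm) :: t).map (fun p => if p.1 == m then ((m, w) : Char × Int) else p))
            = (m, w) :: t from by rw [List.map_cons, map_repl_id t m w hmt]; simp]
      simp only [List.map_cons]
      rw [List.erase_cons_head]
    · have hmt : (m, vm) ∈ t := by
        rcases List.mem_cons.1 hm with h | h
        · exact absurd (congrArg Prod.fst h).symm hk
        · exact h
      have hvm : vm ∈ t.map (fun p => p.2) := List.mem_map.2 ⟨(m, vm), hmt, rfl⟩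
      have hrepl : (if p.1 == m then ((m, w) : Char × Int) else p) = p := by
        simp [hk]
      simp only [List.map_cons, hrepl]
      refine ((ih hmt hnd.2).cons p.2).trans ?_
      refine (List.Perm.swap w p.2 _).trans ?_
      exact ((erase_cons_perm p.2 vm _ hvm).symm).cons w

lemma head_eq_max (d : PySem.Dict Char Int) (m : Char) (r : Int) (rest : List Int)
    (hnd : d.keys.Nodup) (hperm : (r :: rest).Perm d.values)
    (hpw : (r :: rest).Pairwise (fun a b => b ≤ a))
    (hmax : PySem.List.max? d.keys (fun k => d.getD k 0) = some m) :
    d.getD m 0 = r := by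
  have hvals := PySem.Dict.values_eq_map_keys d hnd 0
  have hr : r ∈ d.values := hperm.mem_iff.1 (List.mem_cons_self)
  have hrk : ∃ k ∈ d.keys, d.getD k 0 = r := by
    rw [hvals] at hr; simpa using hr
  obtain ⟨k, hk, hkr⟩ := hrk
  have h1 : r ≤ d.getD m 0 := hkr ▸ PySem.List.max?_isMax hmax k hk
  have hm : d.getD m 0 ∈ d.values := by
    rw [hvals]; exact List.mem_map.2 ⟨m, PySem.List.max?_mem hmax, rfl⟩
  have h2 : d.getD m 0 ≤ r := by
    rcases List.mem_cons.1 (hperm.symm.mem_iff.1 hm) with h | h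
    · omega
    · exact (List.pairwise_cons.1 hpw).1 _ h
  omega

-- the coordinated loop: A's dict state and B's descending value list stay permutations of each other
lemma loop_eq (items : List (Char × Int)) :
    ∀ (d : PySem.Dict Char Int) (rem : List Int),
    d.keys.Nodup → rem.Perm d.values → rem.Pairwise (fun a b => b ≤ a) →
    (items ≠ [] → rem ≠ []) →
    ((items.foldl stepA (d, none)).2.getD "true")
      = (((items.map (fun p => p.2)).foldl stepB (rem, none)).2.getD "true") := by
  induction items with
  | nil => intro d rem _ _ _ _; rfl
  | cons t ts ih =>
    intro d rem hnd hperm hpw hne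
    obtain ⟨r, rest, rfl⟩ : ∃ r rest, rem = r :: rest := by
      cases rem with
      | nil => exact absurd rfl (hne (by simp))
      | cons r rest => exact ⟨r, rest, rfl⟩
    have hkeysne : d.keys ≠ [] := by
      intro hk
      have hr : (r : Int) ∈ d.values := hperm.mem_iff.1 (by simp)
      rw [PySem.Dict.values_eq_map_keys d hnd 0, hk] at hr
      simp at hr
    obtain ⟨m, hmax⟩ : ∃ m, PySem.List.max? d.keys (fun k => d.getD k 0) = some m := by
      cases h : PySem.List.max? d.keys (fun k => d.getD k 0) with
      | none => exact absurd ((PySem.List.max?_eq_none_iff _ _).1 h) hkeysne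
      | some m => exact ⟨m, rfl⟩
    have hr : d.getD m 0 = r := head_eq_max d m r rest hnd hperm hpw hmax
    simp only [List.map_cons, List.foldl_cons, stepA, stepB, hmax, hr]
    by_cases hgt : t.2 > r
    · simp only [if_pos hgt, foldA_some, foldB_some]
    · simp only [if_neg hgt]
      have hmk : m ∈ d.keys := PySem.List.max?_mem hmax
      have hcont : d.contains m = true := (PySem.Dict.contains_iff_mem_keys d m).2 hmk
      have hitem : (m, r) ∈ d.items := by
        have h1 : (m, d.getD m 0) ∈ d.items := by
          rw [PySem.Dict.items_eq_map_keys d hnd 0]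
          exact List.mem_map.2 ⟨m, hmk, rfl⟩
        rwa [hr] at h1
      have hndf : (d.items.map (fun p => p.1)).Nodup := hnd
      have hnd' : (d.insert m (r - t.2)).keys.Nodup := by
        rw [PySem.Dict.keys_insert_of_contains d _ hcont]; exact hnd
      have hperm' : (insertDesc rest (r - t.2)).Perm (d.insert m (r - t.2)).values := by
        have hvalues : (d.insert m (r - t.2)).values
            = (d.items.map (fun p => if p.1 == m then (m, r - t.2) else p)).map
                (fun p => p.2) := by
          simp [PySem.Dict.values, PySem.Dict.items_insert_of_contains d _ hcont]
        have hrepl := mapsnd_repl_perm d.items m r (r - t.2) hitem hndf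
        have h3 : rest.Perm ((d.items.map (fun p => p.2)).erase r) := by
          have h4 := hperm.erase r
          rw [List.erase_cons_head] at h4
          simpa [PySem.Dict.values] using h4
        rw [hvalues]
        exact (insertDesc_perm _ _).trans ((h3.cons _).trans hrepl.symm)
      have hpw' : (insertDesc rest (r - t.2)).Pairwise (fun a b => b ≤ a) :=
        insertDesc_pairwise _ _ (List.pairwise_cons.1 hpw).2
      exact ih _ _ hnd' hperm' hpw' (fun _ => insertDesc_ne_nil _ _)

-- projecting the values out of A's value-sorted items list gives B's sorted value list
lemma mapsnd_sorted (its : List (Char × Int)) :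
    (PySem.List.sorted its (fun p => p.2) true).map (fun p => p.2)
      = PySem.List.sorted (its.map (fun p => p.2)) (fun x => x) true := by
  apply List.Perm.eq_of_pairwise (le := fun a b => b ≤ a)
  · intro a b _ _ h1 h2; omega
  · exact List.pairwise_map.2 (PySem.List.sorted_pairwise_rev its (fun p => p.2))
  · exact PySem.List.sorted_pairwise_rev _ _
  · exact ((PySem.List.sorted_perm its (fun p => p.2) true).map _).trans
      ((PySem.List.sorted_perm _ _ true).symm)

-- ===== VERDICT (by name: the statement is the Claim_ definition above) =====
lemma foldl_pyIdx {σ : Type} (l : List Char) (upd : σ → Char → σ) (init : σ) :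
    (PySem.List.pyRange 0 (PySem.List.len l)).foldl
        (fun d i => upd d (PySem.List.pyGetD l i ' ')) init
      = l.foldl upd init := by
  have h0 : ((PySem.List.pyRange 0 (PySem.List.len l)).map
        (fun j => PySem.List.pyGetD l j ' ')).foldl upd init
      = (PySem.List.pyRange 0 (PySem.List.len l)).foldl
          (fun d i => upd d (PySem.List.pyGetD l i ' ')) init := by
    rw [List.foldl_map]
  rw [PySem.List.map_pyGetD_pyRange_zero] at h0
  exact h0.symm

theorem check_strings_map_spec : Claim_equal_check_strings_map := by
  intro s1 s2 _
  unfold Spec_check_strings_map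
  simp only [check_strings_map, check_strings_map_alt]
  by_cases h : PySem.Str.len s1 = PySem.Str.len s2
  case neg => rw [if_pos h, if_pos h]
  case pos =>
  rw [if_neg (fun hc => hc h), if_neg (fun hc => hc h)]
  have hl : s1.toList.length = s2.toList.length := by
    have h2 := h
    rw [PySem.Str.len_eq, PySem.Str.len_eq] at h2
    exact_mod_cast h2
  have hlen1 : PySem.Str.len s1 = PySem.List.len s1.toList := by
    rw [PySem.Str.len_eq]; simp [PySem.List.len]
  have hlen2 : PySem.Str.len s1 = PySem.List.len s2.toList := by
    rw [h, PySem.Str.len_eq]; simp [PySem.List.len]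
  have hcount :
      (PySem.List.pyRange 0 (PySem.Str.len s1)).foldl
        (fun (st : PySem.Dict Char Int × PySem.Dict Char Int) i =>
          (match st.1.get? (PySem.List.pyGetD s1.toList i ' ') with
            | none => st.1.insert (PySem.List.pyGetD s1.toList i ' ') 1
            | some v => st.1.insert (PySem.List.pyGetD s1.toList i ' ') (v + 1),
           match st.2.get? (PySem.List.pyGetD s2.toList i ' ') with
            | none => st.2.insert (PySem.List.pyGetD s2.toList i ' ') 1
            | some v => st.2.insert (PySem.List.pyGetD s2.toList i ' ') (v + 1)))
        (PySem.Dict.empty, PySem.Dict.empty)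
      = (PySem.Dict.counter s1.toList, PySem.Dict.counter s2.toList) := by
    rw [PySem.List.foldl_prod_mk
      (f := fun (d : PySem.Dict Char Int) i =>
        match d.get? (PySem.List.pyGetD s1.toList i ' ') with
        | none => d.insert (PySem.List.pyGetD s1.toList i ' ') 1
        | some v => d.insert (PySem.List.pyGetD s1.toList i ' ') (v + 1))
      (g := fun (d : PySem.Dict Char Int) i =>
        match d.get? (PySem.List.pyGetD s2.toList i ' ') with
        | none => d.insert (PySem.List.pyGetD s2.toList i ' ') 1
        | some v => d.insert (PySem.List.pyGetD s2.toList i ' ') (v + 1))]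
    simp only [Prod.mk.injEq]
    constructor
    · rw [hlen1, foldl_pyIdx s1.toList
        (fun (d : PySem.Dict Char Int) c =>
          match d.get? c with
          | none => d.insert c 1
          | some v => d.insert c (v + 1))]
      exact countfold s1.toList
    · rw [hlen2, foldl_pyIdx s2.toList
        (fun (d : PySem.Dict Char Int) c =>
          match d.get? c with
          | none => d.insert c 1
          | some v => d.insert c (v + 1))]
      exact countfold s2.toList
  simp only [hcount]
  show ((PySem.List.sorted (PySem.Dict.counter s1.toList).items (fun p => p.2) true).foldl
          stepA (PySem.Dict.counter s2.toList, none)).2.getD "true"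
      = ((PySem.List.sorted ((PySem.Set.ofList s1.toList).map
            (fun c => (s1.toList.count c : Int))) (fun x => x) true).foldl
          stepB (PySem.List.sorted ((PySem.Set.ofList s2.toList).map
            (fun c => (s2.toList.count c : Int))) (fun x => x) true, none)).2.getD "true"
  have hneed : (PySem.List.sorted (PySem.Dict.counter s1.toList).items (fun p => p.2) true).map
        (fun p => p.2)
      = PySem.List.sorted ((PySem.Set.ofList s1.toList).map
          (fun c => (s1.toList.count c : Int))) (fun x => x) true := by
    rw [mapsnd_sorted]
    congr 1
    simp [PySem.Dict.items_counter]
  have hvals2 : (PySem.Dict.counter s2.toList).values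
      = (PySem.Set.ofList s2.toList).map (fun c => (s2.toList.count c : Int)) := by
    simp [PySem.Dict.values, PySem.Dict.items_counter]
  have hperm0 : (PySem.List.sorted ((PySem.Set.ofList s2.toList).map
        (fun c => (s2.toList.count c : Int))) (fun x => x) true).Perm
      (PySem.Dict.counter s2.toList).values := by
    rw [hvals2]
    exact PySem.List.sorted_perm _ _ _
  have hpw0 : (PySem.List.sorted ((PySem.Set.ofList s2.toList).map
        (fun c => (s2.toList.count c : Int))) (fun x => x) true).Pairwise
      (fun a b => b ≤ a) := by
    simpa using PySem.List.sorted_pairwise_rev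
      ((PySem.Set.ofList s2.toList).map (fun c => (s2.toList.count c : Int))) (fun x => x)
  have hne : PySem.List.sorted (PySem.Dict.counter s1.toList).items (fun p => p.2) true ≠ []
      → PySem.List.sorted ((PySem.Set.ofList s2.toList).map
          (fun c => (s2.toList.count c : Int))) (fun x => x) true ≠ [] := by
    intro hi hr
    rw [PySem.List.sorted_eq_nil_iff] at hr
    rw [List.map_eq_nil_iff] at hr
    have hl2 : s2.toList = [] := by
      cases hc : s2.toList with
      | nil => rfl
      | cons c cs =>
        have : c ∈ PySem.Set.ofList s2.toList := by
          rw [PySem.Set.mem_ofList, hc]; exact List.mem_cons_self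
        rw [hr] at this
        simp at this
    have hl1 : s1.toList = [] := by
      have : s1.toList.length = 0 := by rw [hl, hl2]; rfl
      exact List.length_eq_zero_iff.1 this
    apply hi
    rw [PySem.List.sorted_eq_nil_iff, hl1]
    rfl
  rw [← hneed]
  exact loop_eq _ _ _ (PySem.Dict.nodup_keys_counter s2.toList) hperm0 hpw0 hne
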